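-- pv_equiv track=rewrite | github.com/verba-neo/multi-it-ai-2 | p92334/유재찬.py | solution
-- ===== SOURCE A (Python) =====
-- def solution(id_list, report, k):
--     answer = []
--
--     report_dict = {user_id: set() for user_id in id_list}
--     report_count = {user_id: 0 for user_id in id_list}
--
--     for line in report:
--         user_id, reported_id = line.split(" ")
--         report_dict[user_id].add(reported_id)
--
--     for user_id, reported_id_set in report_dict.items():
--         for reported_id in reported_id_set:
--             report_count[reported_id] += 1
--
--     for user_id, reported_id_set in report_dict.items():
--         count = 0
--         for reported_id in reported_id_set:
--             if report_count[reported_id] >= k: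
--                 count += 1
--         answer.append(count)
--
--     return answer
-- ===== SOURCE B (Python) =====
-- def solution(id_list, report, k):
--     # Reverse index: reported user -> set of distinct reporters; then scatter
--     # credit from over-reported users back to their reporters.
--     reporters = {}
--     for line in report:
--         user_id, reported_id = line.split(" ")
--         reporters.setdefault(reported_id, set()).add(user_id)
--     ids = list(dict.fromkeys(id_list))
--     answer = {user_id: 0 for user_id in ids}
--     for reporter_set in reporters.values():
--         if len(reporter_set) >= k:
--             for user_id in reporter_set:
--                 answer[user_id] += 1
--     return [answer[user_id] for user_id in ids]
-- ===== Notes on version B (the rewrite author's own statement) =====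
-- stated objective: alternative
-- what changed: B builds a reverse index from each reported user to the set of its distinct reporters and scatters one credit per over-reported user to every reporter, instead of A's per-reporter gather over per-reporter target sets with a separately accumulated report_count dict.
import Mathlib
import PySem

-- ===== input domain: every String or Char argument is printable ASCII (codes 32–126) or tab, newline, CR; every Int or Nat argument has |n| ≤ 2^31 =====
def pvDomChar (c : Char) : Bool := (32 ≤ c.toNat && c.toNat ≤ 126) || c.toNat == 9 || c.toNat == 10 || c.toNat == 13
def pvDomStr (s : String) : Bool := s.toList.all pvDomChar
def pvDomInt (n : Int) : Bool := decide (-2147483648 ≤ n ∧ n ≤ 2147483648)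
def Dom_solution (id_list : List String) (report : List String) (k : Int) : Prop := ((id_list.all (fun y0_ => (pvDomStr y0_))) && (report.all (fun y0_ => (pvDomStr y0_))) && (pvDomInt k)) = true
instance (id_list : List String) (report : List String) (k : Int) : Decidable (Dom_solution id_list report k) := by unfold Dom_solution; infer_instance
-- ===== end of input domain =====

-- B replaces A's per-reporter gather (per-reporter target sets plus a separate report_count
-- dict) by a reverse index reported→reporters and a scatter of credit; return values proved equal on Pre_.

-- ===== PORT A =====
-- 'user_id, reported_id = line.split(" ")': some (u, t) iff the split has exactly two parts
-- (otherwise Python raises ValueError on unpacking; such inputs are excluded by Pre_)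
def solutionParse (line : String) : Option (String × String) :=
  match PySem.Str.split? line " " with
  | some [u, t] => some (u, t)
  | _ => none

def solution (id_list : List String) (report : List String) (k : Int) : List Int :=
  -- report_dict = {user_id: set() for user_id in id_list}; report_count = {user_id: 0 for user_id in id_list}
  let report_dict0 : PySem.Dict String (PySem.Set String) :=
    id_list.foldl (fun d u => d.insert u PySem.Set.empty) PySem.Dict.empty
  let report_count0 : PySem.Dict String Int :=
    id_list.foldl (fun d u => d.insert u 0) PySem.Dict.empty
  -- for line in report: u, t = line.split(" "); report_dict[u].add(t)   (KeyError outside Pre_)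
  let report_dict :=
    report.foldl (fun d line =>
      match solutionParse line with
      | some p => d.modify p.1 PySem.Set.empty (fun s => PySem.Set.add s p.2)
      | none => d) report_dict0
  -- for u, s in report_dict.items(): for t in s: report_count[t] += 1   (set-iteration order does not affect the counts)
  let report_count :=
    report_dict.items.foldl (fun c p =>
      p.2.foldl (fun c t => c.modify t 0 (· + 1)) c) report_count0
  -- for u, s in report_dict.items(): count = 0; for t in s: if report_count[t] >= k: count += 1; answer.append(count)
  report_dict.items.foldl (fun answer p =>
    answer ++ [p.2.foldl (fun cnt t => if k ≤ report_count.getD t 0 then cnt + 1 else cnt) 0]) []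

-- ===== PORT B =====
def solution_alt (id_list : List String) (report : List String) (k : Int) : List Int :=
  -- reporters.setdefault(reported_id, set()).add(user_id)
  let reporters : PySem.Dict String (PySem.Set String) :=
    report.foldl (fun d line =>
      match solutionParse line with
      | some p => d.modify p.2 PySem.Set.empty (fun s => PySem.Set.add s p.1)
      | none => d) PySem.Dict.empty
  -- ids = list(dict.fromkeys(id_list)); answer = {u: 0 for u in ids}
  let ids := PySem.List.dedup id_list
  let answer0 : PySem.Dict String Int :=
    ids.foldl (fun d u => d.insert u 0) PySem.Dict.empty
  -- for s in reporters.values(): if len(s) >= k: for u in s: answer[u] += 1   (order-independent sums)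
  let answer :=
    reporters.values.foldl (fun a s =>
      if k ≤ (s.length : Int) then s.foldl (fun a u => a.modify u 0 (· + 1)) a else a) answer0
  -- return [answer[u] for u in ids]
  ids.map (fun u => answer.getD u 0)

-- ===== PRECONDITION & SPEC =====
-- Pre_ excludes exactly the inputs on which A raises: a report line whose split(" ") does not
-- have exactly two parts (ValueError on unpacking), or a line mentioning an id absent from
-- id_list (KeyError on report_dict[user_id] / report_count[reported_id]).
def Pre_solution (id_list : List String) (report : List String) (k : Int) : Prop :=
  ∀ line ∈ report,
    ((PySem.Str.split? line " ").getD []).length = 2 ∧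
    ∀ x ∈ (PySem.Str.split? line " ").getD [], x ∈ id_list
instance (id_list : List String) (report : List String) (k : Int) : Decidable (Pre_solution id_list report k) := by unfold Pre_solution; infer_instance

def pvWitness_solution : List String × List String × Int :=
  (["muzi", "frodo", "apeach"], ["muzi frodo", "apeach frodo", "muzi frodo"], 2)

def Spec_solution (id_list : List String) (report : List String) (k : Int) (out : List Int) : Prop := out = solution_alt id_list report k
instance (id_list : List String) (report : List String) (k : Int) (out : List Int) : Decidable (Spec_solution id_list report k out) := by unfold Spec_solution; infer_instance

-- ===== CLAIM (what is proved, stated in full; the proofs are below) =====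
def Claim_equal_solution : Prop := ∀ (id_list : List String) (report : List String) (k : Int), Dom_solution id_list report k → Pre_solution id_list report k → Spec_solution id_list report k (solution id_list report k)

-- ===== LEMMAS AND PROOFS =====

-- the parsed (reporter, reported) pairs of the report
def pvPairs (report : List String) : List (String × String) := report.filterMap solutionParse
-- targets of reporter u (as A's report_dict stores them)
def pvS (pairs : List (String × String)) (u : String) : PySem.Set String :=
  PySem.Set.ofList ((pairs.filter (fun p => p.1 == u)).map (·.2))
-- distinct reporters of target t (as B's reverse index stores them)
def pvR (pairs : List (String × String)) (t : String) : PySem.Set String :=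
  PySem.Set.ofList ((pairs.filter (fun p => p.2 == t)).map (·.1))
-- the reported users, i.e. B's reverse-index keys
def pvTk (pairs : List (String × String)) : PySem.Set String :=
  PySem.Set.ofList (pairs.map (·.2))

-- a loop over parsed lines is a loop over the parsed pairs
lemma pv_foldl_parse {α : Type} (step : α → String × String → α) (l : List String) (d : α) :
    l.foldl (fun d line =>
      match solutionParse line with
      | some p => step d p
      | none => d) d = (pvPairs l).foldl step d := by
  induction l generalizing d with
  | nil => rfl
  | cons h t ih => cases hp : solutionParse h <;> simp [pvPairs, hp] <;> rw [← pvPairs] at * <;> simp [ih]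

-- the set-building modify loop, read through getD
lemma pv_getD_modify_add (key val : String × String → String) (l : List (String × String))
    (d : PySem.Dict String (PySem.Set String)) (u : String) :
    (l.foldl (fun d p => d.modify (key p) PySem.Set.empty (fun s => PySem.Set.add s (val p))) d).getD u PySem.Set.empty
      = PySem.Set.update (d.getD u PySem.Set.empty) ((l.filter (fun p => key p == u)).map val) := by
  induction l generalizing d with
  | nil => simp [PySem.Set.update_nil]
  | cons p t ih =>
    simp only [List.foldl_cons, List.filter_cons]
    rw [ih]
    by_cases hk : key p = u
    · simp [hk, PySem.Dict.getD_modify_self, PySem.Set.update_cons]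
    · have hb : (key p == u) = false := by simpa using hk
      rw [PySem.Dict.getD_modify_of_ne (hne := Ne.symm hk)]
      simp [hb]

-- the nested counting loop of A, read through getD
lemma pv_getD_count_outer (items : List (String × PySem.Set String)) (c : PySem.Dict String Int) (t : String) :
    (items.foldl (fun c p => p.2.foldl (fun c x => c.modify x 0 (· + 1)) c) c).getD t 0
      = c.getD t 0 + (items.map (fun p => (p.2.count t : Int))).sum := by
  induction items generalizing c with
  | nil => simp
  | cons p l ih =>
    simp only [List.foldl_cons, List.map_cons, List.sum_cons]
    rw [ih, PySem.Dict.getD_foldl_modify_add_one]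
    ring

-- the guarded scatter loop of B, read through getD
lemma pv_getD_scatter (vals : List (PySem.Set String)) (k : Int) (a : PySem.Dict String Int) (u : String) :
    (vals.foldl (fun a s => if k ≤ (s.length : Int) then s.foldl (fun a x => a.modify x 0 (· + 1)) a else a) a).getD u 0
      = a.getD u 0 + ((vals.filter (fun s => decide (k ≤ (s.length : Int)))).map (fun s => (s.count u : Int))).sum := by
  induction vals generalizing a with
  | nil => simp
  | cons s l ih =>
    simp only [List.foldl_cons, List.filter_cons]
    by_cases hk : k ≤ (s.length : Int)
    · simp only [hk, if_true, decide_true, List.map_cons, List.sum_cons]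
      rw [ih, PySem.Dict.getD_foldl_modify_add_one]
      ring
    · simp only [hk, if_false, decide_false, Bool.false_eq_true, ih]

-- a constant-initialisation loop leaves getD-with-that-default at the default
lemma pv_getD_insert_const {ν : Type} (l : List String) (v : ν) (d : PySem.Dict String ν) (u : String)
    (h : d.getD u v = v) : (l.foldl (fun d x => d.insert x v) d).getD u v = v := by
  induction l generalizing d with
  | nil => exact h
  | cons x xs ih =>
    simp only [List.foldl_cons]
    exact ih _ (by rw [PySem.Dict.getD_insert]; split_ifs <;> simp [h])

lemma pv_update_subset (s : PySem.Set String) (xs : List String) (h : ∀ x ∈ xs, x ∈ s) :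
    PySem.Set.update s xs = s := by
  rw [PySem.Set.update_eq_append_filter]
  have he : (PySem.Set.ofList xs).filter (fun y => !(PySem.Set.contains s y)) = [] := by
    rw [List.filter_eq_nil_iff]
    intro a ha
    simp only [PySem.Set.mem_ofList] at ha
    simp only [Bool.not_eq_true', Bool.not_eq_false]
    exact (PySem.Set.contains_iff s a).2 (h a ha)
  rw [he, List.append_nil]

lemma pv_mem_S (pairs : List (String × String)) (u t : String) :
    t ∈ pvS pairs u ↔ (u, t) ∈ pairs := by
  simp only [pvS, PySem.Set.mem_ofList, List.mem_map, List.mem_filter, beq_iff_eq]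
  constructor
  · rintro ⟨p, ⟨hp, h1⟩, h2⟩; rw [← h1, ← h2] at *; simpa using hp
  · intro h; exact ⟨(u, t), ⟨h, rfl⟩, rfl⟩

lemma pv_mem_R (pairs : List (String × String)) (u t : String) :
    u ∈ pvR pairs t ↔ (u, t) ∈ pairs := by
  simp only [pvR, PySem.Set.mem_ofList, List.mem_map, List.mem_filter, beq_iff_eq]
  constructor
  · rintro ⟨p, ⟨hp, h2⟩, h1⟩; rw [← h1, ← h2] at *; simpa using hp
  · intro h; exact ⟨(u, t), ⟨h, rfl⟩, rfl⟩

lemma pv_nodup_S (pairs : List (String × String)) (u : String) : (pvS pairs u).Nodup :=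
  PySem.Set.nodup_ofList _

lemma pv_nodup_R (pairs : List (String × String)) (t : String) : (pvR pairs t).Nodup :=
  PySem.Set.nodup_ofList _

-- a 0/1 count on a Nodup list is a membership indicator
lemma pv_count_nodup {α : Type} [DecidableEq α] (l : List α) (h : l.Nodup) (x : α) :
    (l.count x : Int) = if x ∈ l then 1 else 0 := by
  split_ifs with hm
  · rw [List.count_eq_one_of_mem h hm]; rfl
  · rw [List.count_eq_zero_of_not_mem hm]; rfl

-- the double-counting core: gather = scatter, pointwise at each reporter u
lemma pv_main (pairs : List (String × String)) (D : List String) (hD : D.Nodup)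
    (hfst : ∀ p ∈ pairs, p.1 ∈ D) (k : Int) (u : String) :
    (((pvS pairs u).countP (fun t => decide (k ≤ (D.map (fun u' => ((pvS pairs u').count t : Int))).sum)) : Nat) : Int)
      = ((((pvTk pairs).map (fun t => pvR pairs t)).filter (fun s => decide (k ≤ (s.length : Int)))).map
          (fun s => (s.count u : Int))).sum := by
  have hrc : ∀ t, (D.map (fun u' => ((pvS pairs u').count t : Int))).sum = ((pvR pairs t).length : Int) := by
    intro t
    have h1 : D.map (fun u' => ((pvS pairs u').count t : Int))
        = D.map (fun u' => if decide ((u', t) ∈ pairs) = true then (1:Int) else 0) := by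
      apply List.map_congr_left
      intro u' _
      rw [pv_count_nodup _ (pv_nodup_S pairs u') t]
      simp [pv_mem_S]
    rw [h1, PySem.List.sum_map_ite_one_zero]
    congr 1
    rw [List.countP_eq_length_filter]
    apply ((List.perm_ext_iff_of_nodup (hD.filter _) (pv_nodup_R pairs t)).2 _).length_eq
    intro a
    simp only [List.mem_filter, pv_mem_R, decide_eq_true_eq]
    exact ⟨fun h => h.2, fun h => ⟨hfst (a, t) h, h⟩⟩
  have hL : (pvS pairs u).countP (fun t => decide (k ≤ (D.map (fun u' => ((pvS pairs u').count t : Int))).sum))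
      = (pvS pairs u).countP (fun t => decide (k ≤ ((pvR pairs t).length : Int))) := by
    apply List.countP_congr
    intro t _
    rw [hrc t]
  rw [hL]
  have hRm : ((pvTk pairs).map (fun t => pvR pairs t)).filter (fun s => decide (k ≤ (s.length : Int)))
      = ((pvTk pairs).filter (fun t => decide (k ≤ ((pvR pairs t).length : Int)))).map (fun t => pvR pairs t) := by
    rw [List.filter_map]
    rfl
  rw [hRm, List.map_map]
  have hRc : ((pvTk pairs).filter (fun t => decide (k ≤ ((pvR pairs t).length : Int)))).map
        ((fun s => (s.count u : Int)) ∘ fun t => pvR pairs t)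
      = ((pvTk pairs).filter (fun t => decide (k ≤ ((pvR pairs t).length : Int)))).map
        (fun t => if decide ((u, t) ∈ pairs) = true then (1:Int) else 0) := by
    apply List.map_congr_left
    intro t _
    simp only [Function.comp]
    rw [pv_count_nodup _ (pv_nodup_R pairs t) u]
    simp [pv_mem_R]
  rw [hRc, PySem.List.sum_map_ite_one_zero]
  congr 1
  rw [List.countP_eq_length_filter, List.countP_eq_length_filter, List.filter_filter]
  apply ((List.perm_ext_iff_of_nodup ((pv_nodup_S pairs u).filter _)
    ((PySem.Set.nodup_ofList (pairs.map (·.2))).filter _)).2 _).length_eq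
  intro t
  simp only [List.mem_filter, pv_mem_S, PySem.Set.mem_ofList, List.mem_map,
    decide_eq_true_eq, Bool.and_eq_true]
  aesop

-- A computes, per distinct id u, the number of its targets whose total distinct-reporter count reaches k
lemma pv_A_eq (id_list : List String) (report : List String) (k : Int)
    (hfst : ∀ p ∈ pvPairs report, p.1 ∈ id_list) :
    solution id_list report k
      = (PySem.Set.ofList id_list).map (fun u =>
          (((pvS (pvPairs report) u).countP (fun t => decide (k ≤
            ((PySem.Set.ofList id_list).map (fun u' => ((pvS (pvPairs report) u').count t : Int))).sum)) : Nat) : Int)) := by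
  simp only [solution]
  rw [pv_foldl_parse]
  have hnd0 : (id_list.foldl (fun d u => d.insert u PySem.Set.empty) (PySem.Dict.empty : PySem.Dict String (PySem.Set String))).keys.Nodup :=
    PySem.Dict.nodup_keys_foldl_insert id_list (fun _ _ => PySem.Set.empty) PySem.Dict.empty PySem.Dict.nodup_keys_empty
  have hnd : ((pvPairs report).foldl (fun d p => d.modify p.1 PySem.Set.empty (fun s => PySem.Set.add s p.2))
      (id_list.foldl (fun d u => d.insert u PySem.Set.empty) (PySem.Dict.empty : PySem.Dict String (PySem.Set String)))).keys.Nodup :=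
    PySem.Dict.nodup_keys_foldl_modify_key (pvPairs report) (fun p : String × String => p.1) PySem.Set.empty (fun _ p => fun s => PySem.Set.add s p.2) _ hnd0
  have hkeys : ((pvPairs report).foldl (fun d p => d.modify p.1 PySem.Set.empty (fun s => PySem.Set.add s p.2))
      (id_list.foldl (fun d u => d.insert u PySem.Set.empty) (PySem.Dict.empty : PySem.Dict String (PySem.Set String)))).keys
      = PySem.Set.ofList id_list := by
    rw [PySem.Dict.keys_foldl_modify_key, PySem.Dict.keys_foldl_insert]
    simp only [PySem.Dict.keys_empty, PySem.Set.update_nil_left]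
    apply pv_update_subset
    intro x hx
    simp only [List.mem_map] at hx
    obtain ⟨p, hp, hpx⟩ := hx
    rw [PySem.Set.mem_ofList, ← hpx]
    exact hfst p hp
  have hget : ∀ u, ((pvPairs report).foldl (fun d p => d.modify p.1 PySem.Set.empty (fun s => PySem.Set.add s p.2))
      (id_list.foldl (fun d u => d.insert u PySem.Set.empty) (PySem.Dict.empty : PySem.Dict String (PySem.Set String)))).getD u PySem.Set.empty
      = pvS (pvPairs report) u := by
    intro u
    rw [pv_getD_modify_add (key := fun p => p.1) (val := fun p => p.2),
      pv_getD_insert_const _ _ _ _ (PySem.Dict.getD_empty _ _)]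
    rfl
  have hitems : ((pvPairs report).foldl (fun d p => d.modify p.1 PySem.Set.empty (fun s => PySem.Set.add s p.2))
      (id_list.foldl (fun d u => d.insert u PySem.Set.empty) (PySem.Dict.empty : PySem.Dict String (PySem.Set String)))).items
      = (PySem.Set.ofList id_list).map (fun u => (u, pvS (pvPairs report) u)) := by
    rw [PySem.Dict.items_eq_map_keys _ hnd PySem.Set.empty, hkeys]
    apply List.map_congr_left
    intro u _
    rw [hget u]
  rw [hitems]
  rw [PySem.List.foldl_append_singleton_eq_map]
  rw [List.map_map, List.nil_append]
  apply List.map_congr_left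
  intro u _
  simp only [Function.comp]
  rw [PySem.List.foldl_ite_add_one]
  have hc : ∀ t, (((PySem.Set.ofList id_list).map (fun u => (u, pvS (pvPairs report) u))).foldl
        (fun c p => p.2.foldl (fun c x => c.modify x 0 (· + 1)) c)
        (id_list.foldl (fun d u => d.insert u 0) (PySem.Dict.empty : PySem.Dict String Int))).getD t 0
      = ((PySem.Set.ofList id_list).map (fun u' => ((pvS (pvPairs report) u').count t : Int))).sum := by
    intro t
    rw [pv_getD_count_outer, pv_getD_insert_const _ _ _ _ (PySem.Dict.getD_empty _ _),
      List.map_map]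
    rw [Int.zero_add]
    rfl
  simp only [hc, Int.zero_add]

-- B computes, per distinct id u, the scattered credit from over-reported users back to u
lemma pv_B_eq (id_list : List String) (report : List String) (k : Int) :
    solution_alt id_list report k
      = (PySem.Set.ofList id_list).map (fun u =>
          ((((pvTk (pvPairs report)).map (fun t => pvR (pvPairs report) t)).filter
            (fun s => decide (k ≤ (s.length : Int)))).map (fun s => (s.count u : Int))).sum) := by
  simp only [solution_alt]
  rw [pv_foldl_parse]
  have hnd : ((pvPairs report).foldl (fun d p => d.modify p.2 PySem.Set.empty (fun s => PySem.Set.add s p.1))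
      (PySem.Dict.empty : PySem.Dict String (PySem.Set String))).keys.Nodup :=
    PySem.Dict.nodup_keys_foldl_modify_key (pvPairs report) (fun p : String × String => p.2)
      PySem.Set.empty (fun _ p => fun s => PySem.Set.add s p.1) _ PySem.Dict.nodup_keys_empty
  have hvals : ((pvPairs report).foldl (fun d p => d.modify p.2 PySem.Set.empty (fun s => PySem.Set.add s p.1))
      (PySem.Dict.empty : PySem.Dict String (PySem.Set String))).values
      = (pvTk (pvPairs report)).map (fun t => pvR (pvPairs report) t) := by
    have hitems : ((pvPairs report).foldl (fun d p => d.modify p.2 PySem.Set.empty (fun s => PySem.Set.add s p.1))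
        (PySem.Dict.empty : PySem.Dict String (PySem.Set String))).items
        = (pvTk (pvPairs report)).map (fun t => (t, pvR (pvPairs report) t)) := by
      rw [PySem.Dict.items_eq_map_keys _ hnd PySem.Set.empty,
        PySem.Dict.keys_foldl_modify_key]
      simp only [PySem.Dict.keys_empty, PySem.Set.update_nil_left]
      apply List.map_congr_left
      intro t _
      rw [pv_getD_modify_add (key := fun p => p.2) (val := fun p => p.1)]
      rw [PySem.Dict.getD_empty]
      rfl
    show (((pvPairs report).foldl (fun d p => d.modify p.2 PySem.Set.empty (fun s => PySem.Set.add s p.1))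
        (PySem.Dict.empty : PySem.Dict String (PySem.Set String))).items).map (·.2) = _
    rw [hitems, List.map_map]
    rfl
  rw [hvals]
  simp only [PySem.List.dedup_eq_ofList]
  apply List.map_congr_left
  intro u _
  rw [pv_getD_scatter, pv_getD_insert_const _ _ _ _ (PySem.Dict.getD_empty _ _), Int.zero_add]

-- ===== VERDICT (by name: the statement is the Claim_ definition above) =====
theorem solution_spec : Claim_equal_solution := by
  intro id_list report k _ hpre
  unfold Spec_solution
  have hboth : ∀ p ∈ pvPairs report, p.1 ∈ id_list ∧ p.2 ∈ id_list := by
    intro p hp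
    simp only [pvPairs, List.mem_filterMap] at hp
    obtain ⟨line, hline, hparse⟩ := hp
    obtain ⟨hlen, hmem⟩ := hpre line hline
    unfold solutionParse at hparse
    cases hs : PySem.Str.split? line " " with
    | none => rw [hs] at hparse; simp at hparse
    | some l =>
      rw [hs] at hparse
      rw [hs] at hlen hmem
      simp only [Option.getD_some] at hlen hmem
      rcases l with _ | ⟨u, _ | ⟨t, _ | ⟨x, rest⟩⟩⟩
      · simp at hlen
      · simp at hlen
      · simp only [Option.some.injEq] at hparse
        rw [← hparse]
        exact ⟨hmem u (by simp), hmem t (by simp)⟩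
      · simp at hparse
  rw [pv_A_eq id_list report k (fun p hp => (hboth p hp).1), pv_B_eq]
  apply List.map_congr_left
  intro u _
  exact pv_main (pvPairs report) (PySem.Set.ofList id_list) (PySem.Set.nodup_ofList _)
    (fun p hp => by simpa [PySem.Set.mem_ofList] using (hboth p hp).1) k u
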